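-- pv_equiv track=rewrite | github.com/Kojey/NPSC | software/code/python/extract.py | rgb_byte_data
-- ===== SOURCE A (Python) =====
-- def rgb_byte_data(data):
--   """
--   Convert Salea data into rgb byte information
--   """
--   _data = []
--   for i in range(0,len(data),24):
--     g = bits_to_byte(data[i:i+8])
--     r = bits_to_byte(data[i+8:i+16])
--     b = bits_to_byte(data[i+16:i+24])
--     _data.append([r,g,b])
--   return _data
--
-- def bits_to_byte(bits):
--   number = 0
--   for x in range(len(bits)):
--     number += bits[x]*2**(7-x)
--   return number
-- ===== SOURCE B (Python) =====
-- def rgb_byte_data(data):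
--   """
--   Convert Salea data into rgb byte information
--   """
--   bytes_ = [bits_to_byte(data[i:i+8]) for i in range(0, len(data), 8)]
--   out = []
--   for j in range(0, len(bytes_), 3):
--     g = bytes_[j]
--     r = bytes_[j+1] if j + 1 < len(bytes_) else 0
--     b = bytes_[j+2] if j + 2 < len(bytes_) else 0
--     out.append([r, g, b])
--   return out
--
-- def bits_to_byte(bits):
--   number = 0
--   for x in range(len(bits)):
--     number += bits[x]*2**(7-x)
--   return number
-- ===== Notes on version B (the rewrite author's own statement) =====
-- stated objective: alternative
-- what changed: A computes each RGB triple in one 24-bit-chunk loop with three inline slices; B first converts the whole stream to a list of bytes (one 8-bit slice per byte) and then groups that byte list in threes, padding missing trailing bytes with 0.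
import Mathlib
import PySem

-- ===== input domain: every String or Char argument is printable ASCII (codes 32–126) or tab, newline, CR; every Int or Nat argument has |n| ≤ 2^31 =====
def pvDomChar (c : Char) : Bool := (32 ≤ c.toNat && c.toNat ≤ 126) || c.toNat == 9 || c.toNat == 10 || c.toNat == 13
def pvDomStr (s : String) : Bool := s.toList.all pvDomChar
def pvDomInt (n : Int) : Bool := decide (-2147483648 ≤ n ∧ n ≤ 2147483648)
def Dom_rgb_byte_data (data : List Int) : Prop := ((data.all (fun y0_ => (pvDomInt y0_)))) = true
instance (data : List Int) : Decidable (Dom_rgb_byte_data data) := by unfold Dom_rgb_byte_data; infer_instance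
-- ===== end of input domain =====

-- B replaces the single 24-bit-chunk loop by two passes (bits -> bytes, then bytes -> RGB triples); same cost, different decomposition.


-- ===== PORT A =====
-- bits_to_byte(bits): positional 2**(7-x) weighting; in this program bits is always a
-- slice of length <= 8, so the Python exponent 7-x is nonnegative and (7-x).toNat is exact there.
def bits_to_byte (bits : List Int) : Int :=
  (PySem.List.pyRange 0 bits.length 1).foldl
    (fun number x => number + PySem.List.pyGetD bits x 0 * 2 ^ (7 - x).toNat) 0

def rgb_byte_data (data : List Int) : List (List Int) :=
  (PySem.List.pyRange 0 data.length 24).foldl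
    (fun _data i =>
      let g := bits_to_byte (PySem.List.slice data (some i) (some (i + 8)))
      let r := bits_to_byte (PySem.List.slice data (some (i + 8)) (some (i + 16)))
      let b := bits_to_byte (PySem.List.slice data (some (i + 16)) (some (i + 24)))
      _data ++ [[r, g, b]]) []

-- ===== PORT B =====
-- B: first pass turns every 8-bit slice into a byte, second pass groups bytes in threes,
-- padding missing trailing bytes with 0 (bytes_[j] is always in range: j comes from the range).
def rgb_byte_data_alt (data : List Int) : List (List Int) :=
  let bytes_ := (PySem.List.pyRange 0 data.length 8).map
    (fun i => bits_to_byte (PySem.List.slice data (some i) (some (i + 8))))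
  (PySem.List.pyRange 0 bytes_.length 3).foldl
    (fun out j =>
      let g := PySem.List.pyGetD bytes_ j 0
      let r := if j + 1 < (bytes_.length : Int) then PySem.List.pyGetD bytes_ (j + 1) 0 else 0
      let b := if j + 2 < (bytes_.length : Int) then PySem.List.pyGetD bytes_ (j + 2) 0 else 0
      out ++ [[r, g, b]]) []

-- ===== PRECONDITION & SPEC =====
def Spec_rgb_byte_data (data : List Int) (out : List (List Int)) : Prop := out = rgb_byte_data_alt data
instance (data : List Int) (out : List (List Int)) : Decidable (Spec_rgb_byte_data data out) := by unfold Spec_rgb_byte_data; infer_instance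

-- ===== CLAIM (what is proved, stated in full; the proofs are below) =====
def Claim_equal_rgb_byte_data : Prop := ∀ (data : List Int), Dom_rgb_byte_data data → Spec_rgb_byte_data data (rgb_byte_data data)

-- ===== LEMMAS AND PROOFS =====

theorem pyRange_pos_nil (a b s : Int) (hs : 0 < s) (h : b ≤ a) :
    PySem.List.pyRange a b s = [] := by
  rw [PySem.List.pyRange_of_pos a b hs]
  simp [show ¬ a < b by omega]

theorem pyRange_pos_cons (a b s : Int) (hs : 0 < s) (h : a < b) :
    PySem.List.pyRange a b s = a :: PySem.List.pyRange (a + s) b s := by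
  rw [PySem.List.pyRange_of_pos a b hs, PySem.List.pyRange_of_pos (a+s) b hs]
  by_cases h2 : a + s < b
  · have hn : ((b - a + s - 1) / s).toNat = ((b - (a+s) + s - 1) / s).toNat + 1 := by
      have : b - a + s - 1 = (b - (a+s) + s - 1) + 1 * s := by ring
      rw [this, Int.add_mul_ediv_right _ _ (by omega : s ≠ 0)]
      have : 0 ≤ (b - (a+s) + s - 1) / s := Int.ediv_nonneg (by omega) (by omega)
      omega
    simp only [h, h2, if_pos, hn, List.range_succ_eq_map, List.map_cons, List.map_map]
    refine List.cons_eq_cons.mpr ⟨by ring, ?_⟩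
    apply List.map_congr_left; intro k _; simp [Function.comp]; ring
  · have hn : ((b - a + s - 1) / s) = 1 := by
      rw [← PySem.Int.floordiv_eq_ediv_of_pos hs,
        PySem.Int.floordiv_eq_iff_of_pos]
      all_goals omega
    simp [h, h2, hn]

def chunk24 (d : List Int) : List (List Int) :=
  match d with
  | [] => []
  | x :: xs =>
    [bits_to_byte (((x :: xs).drop 8).take 8),
     bits_to_byte ((x :: xs).take 8),
     bits_to_byte (((x :: xs).drop 16).take 8)] :: chunk24 ((x :: xs).drop 24)
termination_by d.length
decreasing_by simp

theorem chunk24_ne_nil (d : List Int) (h : d ≠ []) :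
    chunk24 d = [bits_to_byte ((d.drop 8).take 8), bits_to_byte (d.take 8),
      bits_to_byte ((d.drop 16).take 8)] :: chunk24 (d.drop 24) := by
  obtain ⟨x, xs, rfl⟩ := List.exists_cons_of_ne_nil h
  rw [chunk24]

theorem loopA (data : List Int) : ∀ (n k : Nat) (acc : List (List Int)), data.length ≤ k + n →
    (PySem.List.pyRange (k : Int) (data.length : Int) 24).foldl
      (fun _data i =>
        let g := bits_to_byte (PySem.List.slice data (some i) (some (i + 8)))
        let r := bits_to_byte (PySem.List.slice data (some (i + 8)) (some (i + 16)))
        let b := bits_to_byte (PySem.List.slice data (some (i + 16)) (some (i + 24)))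
        _data ++ [[r, g, b]]) acc
      = acc ++ chunk24 (data.drop k) := by
  intro n
  induction n with
  | zero => intro k acc h
            rw [pyRange_pos_nil _ _ _ (by omega) (by exact_mod_cast h),
              List.drop_eq_nil_of_le (by omega)]
            simp [chunk24]
  | succ n ih =>
    intro k acc h
    by_cases hk : k < data.length
    · rw [pyRange_pos_cons _ _ _ (by omega) (by exact_mod_cast hk), List.foldl_cons]
      rw [show ((k:Int)+8) = ((k+8:Nat):Int) by push_cast; ring,
          show ((k:Int)+16) = ((k+16:Nat):Int) by push_cast; ring,
          show ((k:Int)+24) = ((k+24:Nat):Int) by push_cast; ring]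
      rw [ih (k+24) _ (by omega), chunk24_ne_nil (data.drop k) (by simp; omega)]
      simp only [PySem.List.slice_natCast, List.drop_drop, List.append_assoc,
        List.cons_append, List.nil_append]
      rw [show k+8-k = 8 from by omega, show k+16-(k+8) = 8 from by omega,
        show k+24-(k+16) = 8 from by omega]
    · rw [pyRange_pos_nil _ _ _ (by omega) (by exact_mod_cast (by omega : data.length ≤ k)),
        List.drop_eq_nil_of_le (by omega)]
      simp [chunk24]

def bchunks (d : List Int) : List Int :=
  match d with
  | [] => []
  | x :: xs => bits_to_byte ((x :: xs).take 8) :: bchunks ((x :: xs).drop 8)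
termination_by d.length
decreasing_by simp

def chunk3 (bs : List Int) : List (List Int) :=
  match bs with
  | [] => []
  | g :: rest => [rest.getD 0 0, g, rest.getD 1 0] :: chunk3 (rest.drop 2)
termination_by bs.length
decreasing_by simp

theorem b2b_nil : bits_to_byte [] = 0 := by decide

theorem bchunks_ne_nil (d : List Int) (h : d ≠ []) :
    bchunks d = bits_to_byte (d.take 8) :: bchunks (d.drop 8) := by
  obtain ⟨x, xs, rfl⟩ := List.exists_cons_of_ne_nil h
  rw [bchunks]

theorem loopBytes (data : List Int) : ∀ (n k : Nat), data.length ≤ k + n →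
    (PySem.List.pyRange (k : Int) (data.length : Int) 8).map
      (fun i => bits_to_byte (PySem.List.slice data (some i) (some (i + 8))))
      = bchunks (data.drop k) := by
  intro n
  induction n with
  | zero => intro k h
            rw [pyRange_pos_nil _ _ _ (by omega) (by exact_mod_cast h),
              List.drop_eq_nil_of_le (by omega)]
            simp [bchunks]
  | succ n ih =>
    intro k h
    by_cases hk : k < data.length
    · rw [pyRange_pos_cons _ _ _ (by omega) (by exact_mod_cast hk), List.map_cons,
        show ((k:Int)+8) = ((k+8:Nat):Int) from by push_cast; ring,
        ih (k+8) (by omega), bchunks_ne_nil (data.drop k) (by simp; omega)]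
      simp only [PySem.List.slice_natCast, List.drop_drop]
      rw [show k+8-k = 8 from by omega]
    · rw [pyRange_pos_nil _ _ _ (by omega) (by exact_mod_cast (by omega : data.length ≤ k)),
        List.drop_eq_nil_of_le (by omega)]
      simp [bchunks]

theorem chunk3_ne_nil (bs : List Int) (h : bs ≠ []) :
    chunk3 bs = [bs.getD 1 0, bs.getD 0 0, bs.getD 2 0] :: chunk3 (bs.drop 3) := by
  obtain ⟨x, xs, rfl⟩ := List.exists_cons_of_ne_nil h
  rw [chunk3]
  cases xs <;> simp [List.getD]

theorem loop3 (bs : List Int) : ∀ (n k : Nat) (acc : List (List Int)), bs.length ≤ k + n →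
    (PySem.List.pyRange (k : Int) (bs.length : Int) 3).foldl
      (fun out j =>
        let g := PySem.List.pyGetD bs j 0
        let r := if j + 1 < (bs.length : Int) then PySem.List.pyGetD bs (j + 1) 0 else 0
        let b := if j + 2 < (bs.length : Int) then PySem.List.pyGetD bs (j + 2) 0 else 0
        out ++ [[r, g, b]]) acc
      = acc ++ chunk3 (bs.drop k) := by
  intro n
  induction n with
  | zero => intro k acc h
            rw [pyRange_pos_nil _ _ _ (by omega) (by exact_mod_cast h),
              List.drop_eq_nil_of_le (by omega)]
            simp [chunk3]
  | succ n ih =>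
    intro k acc h
    by_cases hk : k < bs.length
    · rw [pyRange_pos_cons _ _ _ (by omega) (by exact_mod_cast hk), List.foldl_cons,
        show ((k:Int)+1) = ((k+1:Nat):Int) from by push_cast; ring,
        show ((k:Int)+3) = ((k+3:Nat):Int) from by push_cast; ring,
        show ((k:Int)+2) = ((k+2:Nat):Int) from by push_cast; ring]
      rw [ih (k+3) _ (by omega), chunk3_ne_nil (bs.drop k) (by simp; omega)]
      simp only [Nat.cast_lt, PySem.List.pyGetD_natCast, List.drop_drop, List.append_assoc,
        List.cons_append, List.nil_append, List.getD_eq_getElem?_getD, List.getElem?_drop]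
      simp only [Nat.add_zero]
      by_cases h1 : k+1 < bs.length <;> by_cases h2 : k+2 < bs.length
      · simp [h1, h2]
      · rw [List.getElem?_eq_none (show bs.length ≤ k+2 from by omega)]
        simp [h1, h2]
      · omega
      · rw [List.getElem?_eq_none (show bs.length ≤ k+1 from by omega),
          List.getElem?_eq_none (show bs.length ≤ k+2 from by omega)]
        simp [h1, h2]
    · rw [pyRange_pos_nil _ _ _ (by omega) (by exact_mod_cast (by omega : bs.length ≤ k)),
        List.drop_eq_nil_of_le (by omega)]
      simp [chunk3]

theorem bchunks_getD (m : Nat) : ∀ (d : List Int),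
    (bchunks d).getD m 0 = bits_to_byte ((d.drop (8*m)).take 8) := by
  induction m with
  | zero =>
    intro d
    cases d with
    | nil => simp [bchunks, b2b_nil]
    | cons x xs => rw [bchunks]; simp [List.getD]
  | succ m ih =>
    intro d
    cases d with
    | nil => simp [bchunks, b2b_nil]
    | cons x xs =>
      rw [bchunks, List.getD_cons_succ, ih, List.drop_drop,
        show 8+8*m = 8*(m+1) from by ring]

theorem bchunks_drop (m : Nat) : ∀ (d : List Int),
    (bchunks d).drop m = bchunks (d.drop (8*m)) := by
  induction m with
  | zero => intro d; simp
  | succ m ih =>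
    intro d
    cases d with
    | nil => simp [bchunks]
    | cons x xs =>
      rw [bchunks, List.drop_succ_cons, ih, List.drop_drop,
        show 8+8*m = 8*(m+1) from by ring]

theorem lemGlue (d : List Int) : chunk3 (bchunks d) = chunk24 d := by
  generalize hl : d.length = N
  induction N using Nat.strong_induction_on generalizing d with
  | _ N ih =>
  cases d with
  | nil => simp [bchunks, chunk3, chunk24]
  | cons x xs =>
    rw [bchunks, chunk3, chunk24]
    refine List.cons_eq_cons.mpr ⟨?_, ?_⟩
    · rw [bchunks_getD 0, bchunks_getD 1, List.drop_drop]
      norm_num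
    · rw [bchunks_drop 2, List.drop_drop]
      norm_num
      exact ih ((x::xs).drop 24).length (by subst hl; simp) _ rfl

-- ===== VERDICT (by name: the statement is the Claim_ definition above) =====
theorem rgb_byte_data_spec : Claim_equal_rgb_byte_data := by
  intro data _
  unfold Spec_rgb_byte_data
  have hA := loopA data data.length 0 [] (by omega)
  simp only [Nat.cast_zero, List.drop_zero, List.nil_append] at hA
  have hB := loopBytes data data.length 0 (by omega)
  simp only [Nat.cast_zero, List.drop_zero] at hB
  have h3 := loop3 (bchunks data) (bchunks data).length 0 [] (by omega)
  simp only [Nat.cast_zero, List.drop_zero, List.nil_append] at h3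
  rw [rgb_byte_data, hA, rgb_byte_data_alt]
  simp only [hB, h3, lemGlue]
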